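-- pv_equiv track=rewrite | github.com/divyamvpandian/MyLearning | Practice/GFG.py | rotatedtwice
-- ===== SOURCE A (Python) =====
-- def rotatedtwice(str1, str2):
--     if len(str1) != len(str2):
--         return False
--     n1 = len(str1)
--     i = 0
--     j = n1 - 2
--     n2 = n1
--     while i < n1 and j < n2:
--         if str1[i] != str2[j]:
--             return False
--         else:
--             if j == n2 - 1:
--                 j = 0
--                 n2 = n1 - 2
--             else:
--                 j += 1
--         i += 1
--     return True
-- ===== SOURCE B (Python) =====
-- def rotatedtwice(str1, str2):
--     if len(str1) != len(str2):
--         return False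
--     return str2 == str1[2:] + str1[:2]
-- ===== Notes on version B (the rewrite author's own statement) =====
-- stated objective: simpler
-- what changed: Replaces the index-walking while loop with wraparound bookkeeping (i, j, n2) by a single slice-concatenation comparison str2 == str1[2:] + str1[:2].
import Mathlib
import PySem

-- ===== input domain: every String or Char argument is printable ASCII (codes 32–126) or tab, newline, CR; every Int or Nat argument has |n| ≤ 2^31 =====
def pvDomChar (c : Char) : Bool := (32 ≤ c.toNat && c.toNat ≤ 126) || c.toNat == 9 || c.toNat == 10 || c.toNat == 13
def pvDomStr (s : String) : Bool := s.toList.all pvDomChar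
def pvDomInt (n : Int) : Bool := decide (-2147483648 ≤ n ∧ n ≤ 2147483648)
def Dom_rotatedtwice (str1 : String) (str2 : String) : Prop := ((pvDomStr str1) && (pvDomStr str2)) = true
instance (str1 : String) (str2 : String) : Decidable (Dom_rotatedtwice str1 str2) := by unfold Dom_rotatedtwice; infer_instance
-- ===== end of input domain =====

-- B replaces A's index-walking while loop (state i, j, n2 with wraparound) by one
-- slice-concatenation comparison str2 == str1[2:] + str1[:2]; same O(n) cost, simpler code.

-- ===== PORT A =====
-- A's while loop; fuel bounds the iteration count (i increases each pass, so
-- l1.length + 1 steps always suffice; the loop exits when i reaches n1).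
def rotLoopA (l1 l2 : List Char) (n1 : Int) (i j n2 : Int) : Nat → Bool
  | 0 => true
  | fuel + 1 =>
    if i < n1 ∧ j < n2 then
      match PySem.List.pyGet? l1 i, PySem.List.pyGet? l2 j with
      | some a, some b =>
        if a ≠ b then false
        else if j = n2 - 1 then rotLoopA l1 l2 n1 (i + 1) 0 (n1 - 2) fuel
        else rotLoopA l1 l2 n1 (i + 1) (j + 1) n2 fuel
      | _, _ => false   -- IndexError; unreachable for the loop's own index sequence
    else true

def rotatedtwice (str1 : String) (str2 : String) : Bool :=
  let l1 := str1.toList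
  let l2 := str2.toList
  if (l1.length : Int) ≠ (l2.length : Int) then false
  else rotLoopA l1 l2 l1.length 0 ((l1.length : Int) - 2) l1.length (l1.length + 1)

-- ===== PORT B =====
def rotatedtwice_alt (str1 : String) (str2 : String) : Bool :=
  let l1 := str1.toList
  let l2 := str2.toList
  if (l1.length : Int) ≠ (l2.length : Int) then false
  else l2 == PySem.List.slice l1 (some 2) none ++ PySem.List.slice l1 none (some 2)

-- ===== PRECONDITION & SPEC =====
def Spec_rotatedtwice (str1 : String) (str2 : String) (out : Bool) : Prop := out = rotatedtwice_alt str1 str2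
instance (str1 : String) (str2 : String) (out : Bool) : Decidable (Spec_rotatedtwice str1 str2 out) := by unfold Spec_rotatedtwice; infer_instance

-- ===== CLAIM (what is proved, stated in full; the proofs are below) =====
def Claim_equal_rotatedtwice : Prop := ∀ (str1 : String) (str2 : String), Dom_rotatedtwice str1 str2 → Spec_rotatedtwice str1 str2 (rotatedtwice str1 str2)

-- ===== LEMMAS AND PROOFS =====
theorem rotLoopA_done (l1 l2 : List Char) (n1 i j n2 : Int) (fuel : Nat)
    (h : ¬ (i < n1 ∧ j < n2)) : rotLoopA l1 l2 n1 i j n2 fuel = true := by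
  cases fuel <;> simp [rotLoopA, h]

theorem phase2 (l1 l2 : List Char) (hl : l2.length = l1.length) :
    ∀ (fuel i : Nat), 2 ≤ i → l1.length ≤ i + fuel →
    rotLoopA l1 l2 (l1.length : Int) (i : Int) ((i : Int) - 2) ((l1.length : Int) - 2) fuel
      = (l1.drop i == (l2.drop (i - 2)).take (l1.length - i)) := by
  intro fuel
  induction fuel with
  | zero =>
    intro i h2 hf
    simp only [Nat.add_zero] at hf
    simp [rotLoopA, List.drop_eq_nil_of_le hf, Nat.sub_eq_zero_of_le hf]
  | succ fuel ih =>
    intro i h2 hf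
    by_cases hi : i < l1.length
    · have hcond : ((i : Int) < (l1.length : Int) ∧ (i : Int) - 2 < (l1.length : Int) - 2) := by
        constructor <;> omega
      have hi2 : i - 2 < l2.length := by omega
      have hcast : ((i : Int) - 2) = ((i - 2 : Nat) : Int) := by omega
      have hi' : i < l1.length := hi
      rw [show rotLoopA l1 l2 (l1.length : Int) (i : Int) ((i : Int) - 2) ((l1.length : Int) - 2) (fuel+1)
            = if ((i:Int) < (l1.length:Int) ∧ (i:Int) - 2 < (l1.length:Int) - 2) then
                match PySem.List.pyGet? l1 (i:Int), PySem.List.pyGet? l2 ((i:Int) - 2) with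
                | some a, some b =>
                  if a ≠ b then false
                  else if (i:Int) - 2 = (l1.length:Int) - 2 - 1 then
                    rotLoopA l1 l2 (l1.length:Int) ((i:Int) + 1) 0 ((l1.length:Int) - 2) fuel
                  else rotLoopA l1 l2 (l1.length:Int) ((i:Int) + 1) ((i:Int) - 2 + 1) ((l1.length:Int) - 2) fuel
                | _, _ => false
              else true from rfl]
      rw [if_pos hcond, hcast, PySem.List.pyGet?_natCast, PySem.List.pyGet?_natCast,
          List.getElem?_eq_getElem hi', List.getElem?_eq_getElem hi2]
      rw [List.drop_eq_getElem_cons hi', List.drop_eq_getElem_cons hi2,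
          show l1.length - i = (l1.length - (i+1)) + 1 from by omega, List.take_succ_cons,
          List.cons_beq_cons]
      by_cases hab : l1[i] = l2[i-2]
      · simp only [hab, ne_eq, not_true_eq_false, if_false, beq_self_eq_true, Bool.true_and]
        by_cases hlast : i = l1.length - 1
        · have : ((i-2 : Nat) : Int) = (l1.length : Int) - 2 - 1 := by omega
          rw [if_pos this]
          rw [rotLoopA_done _ _ _ _ _ _ _ (by omega)]
          have : l1.length - (i + 1) = 0 := by omega
          simp [this, List.drop_eq_nil_of_le (show l1.length ≤ i + 1 by omega)]
        · have : ¬ (((i-2 : Nat) : Int) = (l1.length : Int) - 2 - 1) := by omega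
          rw [if_neg this]
          have he : ((i-2 : Nat) : Int) + 1 = ((i+1 : Nat) : Int) - 2 := by omega
          have he2 : ((i : Nat) : Int) + 1 = ((i+1 : Nat) : Int) := by omega
          rw [he, he2, ih (i+1) (by omega) (by omega),
              show i + 1 - 2 = i - 2 + 1 from by omega]
      · simp [hab]
    · rw [rotLoopA_done _ _ _ _ _ _ _ (by intro h; omega)]
      have hf' : l1.length ≤ i := by omega
      simp [List.drop_eq_nil_of_le hf', Nat.sub_eq_zero_of_le hf']

theorem key (l2 rest : List Char) (a0 a1 : Char) (h : l2.length = rest.length + 2) :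
    (l2 = rest ++ [a0, a1]) ↔
      (a0 = l2[rest.length]'(by omega) ∧ a1 = l2[rest.length + 1]'(by omega) ∧
        rest = l2.take rest.length) := by
  constructor
  · rintro rfl
    refine ⟨?_, ?_, ?_⟩
    · rw [List.getElem_append_right (by omega)]
      simp
    · rw [List.getElem_append_right (by omega)]
      simp
    · simp
  · rintro ⟨h0, h1, hr⟩
    have := List.take_append_drop rest.length l2
    rw [List.drop_eq_getElem_cons (by omega), List.drop_eq_getElem_cons (by omega),
        List.drop_eq_nil_of_le (by omega : l2.length ≤ rest.length + 1 + 1)] at this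
    rw [← this, ← h0, ← h1, ← hr]


theorem stepA (l1 l2 : List Char) (n1 i j n2 : Int) (fuel : Nat)
    (hc : i < n1 ∧ j < n2) (a b : Char)
    (ha : PySem.List.pyGet? l1 i = some a) (hb : PySem.List.pyGet? l2 j = some b) :
    rotLoopA l1 l2 n1 i j n2 (fuel + 1) =
      (if a ≠ b then false
       else if j = n2 - 1 then rotLoopA l1 l2 n1 (i + 1) 0 (n1 - 2) fuel
       else rotLoopA l1 l2 n1 (i + 1) (j + 1) n2 fuel) := by
  simp only [rotLoopA, if_pos hc, ha, hb]

theorem main_list (l1 l2 : List Char) :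
    (if (l1.length : Int) ≠ (l2.length : Int) then false
     else rotLoopA l1 l2 l1.length 0 ((l1.length : Int) - 2) l1.length (l1.length + 1))
    = (if (l1.length : Int) ≠ (l2.length : Int) then false
       else l2 == PySem.List.slice l1 (some 2) none ++ PySem.List.slice l1 none (some 2)) := by
  split_ifs with h
  · rfl
  · rw [ne_eq, not_not] at h
    have hl : l2.length = l1.length := by exact_mod_cast h.symm
    rw [show ((2:Int)) = ((2:Nat) : Int) from by norm_num,
        PySem.List.slice_from_natCast, PySem.List.slice_to_natCast]
    match l1, hl with
    | [], hl =>
      have : l2 = [] := List.eq_nil_of_length_eq_zero hl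
      subst this; rfl
    | [a], hl =>
      obtain ⟨b, rfl⟩ := List.length_eq_one_iff.mp hl
      show rotLoopA [a] [b] 1 0 (-1) 1 2 = _
      simp only [rotLoopA, show ((0:Int) < 1 ∧ (-1:Int) < 1) from by omega,
        PySem.List.pyGet?_zero_cons, PySem.List.pyGet?_neg_one, List.getLast?_singleton]
      by_cases hab : a = b
      · subst hab; simp
      · simp [hab, Ne.symm hab]
    | a0 :: a1 :: rest, hl =>
      have hn : (a0 :: a1 :: rest).length = rest.length + 2 := by simp
      have hl2 : l2.length = rest.length + 2 := by omega
      simp only [List.length_cons] at *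
      rw [show (rest.length + 1 + 1 + 1) = (rest.length + 1 + 1) + 1 from rfl,
          stepA (a0 :: a1 :: rest) l2 ((rest.length + 1 + 1 : Nat) : Int) 0
            (((rest.length + 1 + 1 : Nat) : Int) - ((2 : Nat) : Int)) ((rest.length + 1 + 1 : Nat) : Int)
            (rest.length + 1 + 1) (by constructor <;> omega) a0 (l2[rest.length]'(by omega))
            (PySem.List.pyGet?_zero_cons a0 (a1 :: rest))
            (by rw [show ((rest.length + 1 + 1 : Nat) : Int) - ((2 : Nat) : Int) = ((rest.length : Nat) : Int) from by omega,
                    PySem.List.pyGet?_natCast, List.getElem?_eq_getElem (by omega)]),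
          if_neg (show ¬ ((rest.length + 1 + 1 : Nat) : Int) - ((2 : Nat) : Int) = ((rest.length + 1 + 1 : Nat) : Int) - 1 from by omega)]
      rw [show (rest.length + 1 + 1 : Nat) = (rest.length + 1) + 1 from rfl,
          stepA (a0 :: a1 :: rest) l2 ((rest.length + 1 + 1 : Nat) : Int) (0 + 1)
            (((rest.length + 1 + 1 : Nat) : Int) - ((2 : Nat) : Int) + 1) ((rest.length + 1 + 1 : Nat) : Int)
            (rest.length + 1) (by constructor <;> omega) a1 (l2[rest.length + 1]'(by omega))
            (by rw [show ((0 : Int) + 1) = ((1 : Nat) : Int) from by norm_num,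
                    PySem.List.pyGet?_natCast]; rfl)
            (by rw [show ((rest.length + 1 + 1 : Nat) : Int) - ((2 : Nat) : Int) + 1 = ((rest.length + 1 : Nat) : Int) from by omega,
                    PySem.List.pyGet?_natCast, List.getElem?_eq_getElem (by omega)]),
          if_pos (show ((rest.length + 1 + 1 : Nat) : Int) - ((2 : Nat) : Int) + 1 = ((rest.length + 1 + 1 : Nat) : Int) - 1 from by omega)]
      have hp2 := phase2 (a0 :: a1 :: rest) l2 (by simpa using hl) (rest.length + 1) 2 (by omega) (by simp)
      simp only [List.length_cons, List.drop_succ_cons, List.drop_zero] at hp2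
      rw [show ((0 : Int) + 1 + 1) = ((2 : Nat) : Int) from by norm_num,
          show ((0 : Int)) = ((2 : Nat) : Int) - 2 from by norm_num, hp2,
          show rest.length + 1 + 1 - 2 = rest.length from by omega]
      simp only [List.drop_succ_cons, List.drop_zero, List.take_succ_cons, List.take_zero]
      have hk := key l2 rest a0 a1 hl2
      rw [show (2 - 2 : Nat) = 0 from rfl, List.drop_zero]
      by_cases h0 : a0 = l2[rest.length]'(by omega)
      · rw [if_neg (by simp [h0])]
        by_cases h1 : a1 = l2[rest.length + 1]'(by omega)
        · rw [if_neg (by simp [h1]), Bool.eq_iff_iff]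
          simp only [beq_iff_eq]
          rw [hk]
          exact ⟨fun hr => ⟨h0, h1, hr⟩, fun hh => hh.2.2⟩
        · rw [if_pos h1, Bool.eq_iff_iff]
          simp only [Bool.false_eq_true, false_iff, beq_iff_eq]
          intro hc2
          exact h1 (hk.mp hc2).2.1
      · rw [if_pos h0, Bool.eq_iff_iff]
        simp only [Bool.false_eq_true, false_iff, beq_iff_eq]
        intro hc2
        exact h0 (hk.mp hc2).1


-- ===== VERDICT (by name: the statement is the Claim_ definition above) =====
theorem rotatedtwice_spec : Claim_equal_rotatedtwice := by
  intro str1 str2 _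
  unfold Spec_rotatedtwice
  exact main_list str1.toList str2.toList
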